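-- pv_equiv track=rewrite | github.com/moscars/advent-of-code | 2023/day13/p1p2.py | checkSymmetry
-- ===== SOURCE A (Python) =====
-- def checkSymmetry(g, blocked):
--     for i in range(len(g) - 1):
--         if i == blocked:
--             continue
--
--         good = True
--         prev = i
--         nxt = i + 1
--         while prev >= 0 and nxt < len(g):
--             if g[prev] != g[nxt]:
--                 good = False
--                 break
--             prev -= 1
--             nxt += 1
--
--         if good:
--             return i + 1
--
--     return 0
-- ===== SOURCE B (Python) =====
-- def checkSymmetry(g, blocked):
--     # B: candidate-sieve. Start with all unblocked boundary candidates; one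
--     # row-major pass eliminates each candidate as soon as the current row
--     # contradicts its mirror partner. No per-candidate outward expansion loop.
--     n = len(g)
--     cands = [i for i in range(n - 1) if i != blocked]
--     for j, row in enumerate(g):
--         cands = [i for i in cands
--                  if not (0 <= 2 * i + 1 - j < n and g[2 * i + 1 - j] != row)]
--     return cands[0] + 1 if cands else 0
-- ===== Notes on version B (the rewrite author's own statement) =====
-- stated objective: alternative
-- what changed: A tests each split point with its own outward two-pointer expansion loop; B instead builds the list of unblocked split-point candidates once and makes a single row-major pass that sieves out every candidate whose mirror partner of the current row disagrees, then takes the first survivor.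
import Mathlib
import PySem

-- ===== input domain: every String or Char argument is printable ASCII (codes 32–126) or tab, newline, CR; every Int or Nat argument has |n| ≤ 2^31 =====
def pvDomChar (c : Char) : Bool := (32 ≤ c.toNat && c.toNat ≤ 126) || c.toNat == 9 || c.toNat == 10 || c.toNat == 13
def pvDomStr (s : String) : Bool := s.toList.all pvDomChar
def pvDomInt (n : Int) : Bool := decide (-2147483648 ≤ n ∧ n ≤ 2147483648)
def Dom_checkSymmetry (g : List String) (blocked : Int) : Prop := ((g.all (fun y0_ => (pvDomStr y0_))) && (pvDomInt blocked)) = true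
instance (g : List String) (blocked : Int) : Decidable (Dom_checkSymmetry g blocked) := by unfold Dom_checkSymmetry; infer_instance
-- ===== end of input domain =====

-- B replaces A's per-candidate outward two-pointer scan by a candidate sieve: one
-- row-major pass filters the list of unblocked boundary candidates (alternative, same cost).

-- ===== PORT A =====
-- the inner 'while prev >= 0 and nxt < len(g)' loop; within the loop both indices are
-- in range, so pyGetD with a default is exact for g[prev], g[nxt]
def whileA (g : List String) (prev nxt : Int) : Bool :=
  if 0 ≤ prev ∧ nxt < (g.length : Int) then
    if PySem.List.pyGetD g prev "" ≠ PySem.List.pyGetD g nxt "" then false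
    else whileA g (prev - 1) (nxt + 1)
  else true
termination_by (prev + 1).toNat
decreasing_by omega

-- the 'for i in range(len(g) - 1)' loop with its early return
def loopA (g : List String) (blocked : Int) : List Int → Int
  | [] => 0
  | i :: rest =>
    if i == blocked then loopA g blocked rest
    else if whileA g i (i + 1) then i + 1
    else loopA g blocked rest

def checkSymmetry (g : List String) (blocked : Int) : Int :=
  loopA g blocked (PySem.List.pyRange 0 ((g.length : Int) - 1) 1)

-- ===== PORT B =====
-- the per-row list comprehension: keep candidate i unless row j contradicts its
-- mirror partner 2*i+1-j; the guarded index is in range, so pyGetD "" is exact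
def sieveStep (g : List String) (c : List Int) (p : Int × String) : List Int :=
  c.filter (fun i =>
    !(decide (0 ≤ 2*i + 1 - p.1 ∧ 2*i + 1 - p.1 < (g.length : Int)) &&
      (PySem.List.pyGetD g (2*i + 1 - p.1) "" != p.2)))

def checkSymmetry_alt (g : List String) (blocked : Int) : Int :=
  match ((PySem.List.enumerate g).foldl (sieveStep g)
      ((PySem.List.pyRange 0 ((g.length : Int) - 1) 1).filter (fun i => i != blocked))).head? with
  | some i => i + 1
  | none => 0

-- ===== PRECONDITION & SPEC =====
def Spec_checkSymmetry (g : List String) (blocked : Int) (out : Int) : Prop := out = checkSymmetry_alt g blocked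
instance (g : List String) (blocked : Int) (out : Int) : Decidable (Spec_checkSymmetry g blocked out) := by unfold Spec_checkSymmetry; infer_instance

-- ===== CLAIM (what is proved, stated in full; the proofs are below) =====
def Claim_equal_checkSymmetry : Prop := ∀ (g : List String) (blocked : Int), Dom_checkSymmetry g blocked → Spec_checkSymmetry g blocked (checkSymmetry g blocked)

-- ===== LEMMAS AND PROOFS =====

-- A's expanding two-pointer loop, entered at offset k0 from the fold line i,
-- checks exactly the remaining offsets k0, ..., min(i+1, n-i-1) - 1.
lemma whileA_eq (g : List String) (i k0 : Int) (hi : 0 ≤ i) (hk : 0 ≤ k0) :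
    whileA g (i - k0) (i + 1 + k0) =
      ((PySem.List.pyRange k0 (min (i + 1) ((g.length : Int) - i - 1)) 1).all
        (fun k => PySem.List.pyGetD g (i - k) "" == PySem.List.pyGetD g (i + 1 + k) "")) := by
  rw [whileA]
  by_cases hc : k0 < min (i + 1) ((g.length : Int) - i - 1)
  · have hcond : 0 ≤ i - k0 ∧ i + 1 + k0 < (g.length : Int) := by omega
    rw [if_pos hcond, PySem.List.pyRange_one_cons hc, List.all_cons]
    by_cases he : PySem.List.pyGetD g (i - k0) "" = PySem.List.pyGetD g (i + 1 + k0) ""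
    · rw [if_neg (by simpa using he)]
      have hrec := whileA_eq g i (k0 + 1) hi (by omega)
      have e1 : i - k0 - 1 = i - (k0 + 1) := by ring
      have e2 : i + 1 + k0 + 1 = i + 1 + (k0 + 1) := by ring
      rw [e1, e2, hrec]
      simp [he]
    · rw [if_pos he]
      simp [he]
  · have hnc : ¬ (0 ≤ i - k0 ∧ i + 1 + k0 < (g.length : Int)) := by omega
    rw [if_neg hnc, PySem.List.pyRange_one_eq_nil (by omega)]
    simp
termination_by (i - k0 + 1).toNat
decreasing_by omega

-- folding per-element filters = one filter with the conjunction of all tests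
lemma foldl_filter_eq (xs : List (Int × String)) (q : Int × String → Int → Bool) :
    ∀ c0 : List Int,
      xs.foldl (fun c p => c.filter (q p)) c0 =
        c0.filter (fun i => xs.all (fun p => q p i)) := by
  induction xs with
  | nil => intro c0; simp
  | cons p rest ih =>
    intro c0
    rw [List.foldl_cons, ih, List.filter_filter]
    simp [Bool.and_comm]

-- the sieve's per-row test, as a predicate of the candidate under the global pass
def sieveTest (g : List String) (p : Int × String) (i : Int) : Bool :=
  !(decide (0 ≤ 2*i + 1 - p.1 ∧ 2*i + 1 - p.1 < (g.length : Int)) &&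
    (PySem.List.pyGetD g (2*i + 1 - p.1) "" != p.2))

-- B's surviving test over all rows coincides with A's mirror check at line i
lemma sieve_eq_while (g : List String) (i : Int) (hi : 0 ≤ i) :
    (PySem.List.enumerate g).all (fun p => sieveTest g p i) = whileA g i (i + 1) := by
  have hA := whileA_eq g i 0 hi le_rfl
  simp only [sub_zero, add_zero] at hA
  rw [hA]
  rcases Bool.eq_false_or_eq_true
      ((PySem.List.pyRange 0 (min (i + 1) ((g.length : Int) - i - 1)) 1).all
        (fun k => PySem.List.pyGetD g (i - k) "" == PySem.List.pyGetD g (i + 1 + k) "")) with hb | hb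
  all_goals rw [hb]
  case inl =>
    -- all offsets agree: every row keeps candidate i
    rw [List.all_eq_true] at hb ⊢
    intro p hp
    rw [PySem.List.mem_enumerate_iff] at hp
    obtain ⟨j, hj, rfl⟩ := hp
    simp only [sieveTest, Bool.not_eq_true', Bool.and_eq_false_iff]
    by_cases hr : 0 ≤ 2*i + 1 - (0 + (j : Int)) ∧ 2*i + 1 - (0 + (j : Int)) < (g.length : Int)
    · right
      simp only [bne_eq_false_iff_eq]
      by_cases hpos : (j : Int) ≤ i
      · -- row above the line: offset k = i - j, partner i + 1 + k
        have hmemk : i - (j:Int) ∈ PySem.List.pyRange 0 (min (i + 1) ((g.length : Int) - i - 1)) 1 := by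
          refine PySem.List.mem_pyRange_one.mpr ⟨by omega, by omega⟩
        have hk := hb (i - j) hmemk
        have e1 : i - (i - (j:Int)) = (j : Int) := by omega
        have e2 : i + 1 + (i - (j:Int)) = 2*i + 1 - (0 + (j:Int)) := by omega
        rw [e1, e2] at hk
        have e3 : PySem.List.pyGetD g ((j : Int)) "" = g[j] := by
          rw [PySem.List.pyGetD_eq_getElem g (i := (j : Int)) "" (by omega) (by omega)]
          simp
        rw [← e3]
        exact ((beq_iff_eq).mp hk).symm
      · -- row below the line: offset k = j - i - 1, partner i - k
        have hmemk : (j:Int) - i - 1 ∈ PySem.List.pyRange 0 (min (i + 1) ((g.length : Int) - i - 1)) 1 := by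
          refine PySem.List.mem_pyRange_one.mpr ⟨by omega, by omega⟩
        have hk := hb ((j:Int) - i - 1) hmemk
        have e1 : i - ((j:Int) - i - 1) = 2*i + 1 - (0 + (j:Int)) := by omega
        have e2 : i + 1 + ((j:Int) - i - 1) = (j : Int) := by omega
        rw [e1, e2] at hk
        have e3 : PySem.List.pyGetD g ((j : Int)) "" = g[j] := by
          rw [PySem.List.pyGetD_eq_getElem g (i := (j : Int)) "" (by omega) (by omega)]
          simp
        rw [← e3]
        exact (beq_iff_eq).mp hk
    · left; simpa using hr
  case inr =>
    -- some offset k in the overlap disagrees: find the row that kills candidate i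
    rw [List.all_eq_false] at hb ⊢
    obtain ⟨k, hkmem, hkne⟩ := hb
    rw [PySem.List.mem_pyRange_one] at hkmem
    -- the witness row: j = i + 1 + k (always in range)
    have hjlt : (i + 1 + k).toNat < g.length := by omega
    refine ⟨(((i + 1 + k).toNat : Int), g[(i + 1 + k).toNat]), ?_, ?_⟩
    · rw [PySem.List.mem_enumerate_iff]
      exact ⟨(i + 1 + k).toNat, hjlt, by simp⟩
    · have e1 : 2*i + 1 - (((i + 1 + k).toNat : Int)) = i - k := by omega
      have e2 : PySem.List.pyGetD g ((i + 1 + k) : Int) "" = g[(i + 1 + k).toNat] := by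
        rw [PySem.List.pyGetD_eq_getElem g (i := i + 1 + k) "" (by omega) (by omega)]
      have hne : PySem.List.pyGetD g (i - k) "" ≠ PySem.List.pyGetD g (i + 1 + k) "" := by
        simpa using hkne
      have hcb : (PySem.List.pyGetD g (2*i + 1 - (((i + 1 + k).toNat : Int))) "" != g[(i + 1 + k).toNat]) = true := by
        rw [e1, ← e2]
        exact bne_iff_ne.mpr hne
      have hdb : (decide (0 ≤ 2*i + 1 - (((i + 1 + k).toNat : Int)) ∧ 2*i + 1 - (((i + 1 + k).toNat : Int)) < (g.length : Int))) = true := by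
        rw [decide_eq_true_eq]
        omega
      simp only [sieveTest, hdb, hcb]
      simp

-- A's search loop = first element of the filtered candidate list
lemma loopA_eq_head (g : List String) (blocked : Int) (l : List Int) :
    loopA g blocked l =
      (match (l.filter (fun i => i != blocked && whileA g i (i + 1))).head? with
       | some i => i + 1
       | none => 0) := by
  induction l with
  | nil => simp [loopA]
  | cons i rest ih =>
    by_cases hb : i = blocked
    · simp [loopA, hb, ih]
    · by_cases hm : whileA g i (i + 1) = true
      · simp [loopA, hb, hm]
      · simp [loopA, hb, hm, ih]

-- ===== VERDICT (by name: the statement is the Claim_ definition above) =====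
theorem checkSymmetry_spec : Claim_equal_checkSymmetry := by
  intro g blocked _
  unfold Spec_checkSymmetry checkSymmetry checkSymmetry_alt
  rw [loopA_eq_head]
  have hfold : (PySem.List.enumerate g).foldl (sieveStep g)
        ((PySem.List.pyRange 0 ((g.length : Int) - 1) 1).filter (fun i => i != blocked)) =
      ((PySem.List.pyRange 0 ((g.length : Int) - 1) 1).filter (fun i => i != blocked)).filter
        (fun i => (PySem.List.enumerate g).all (fun p => sieveTest g p i)) := by
    exact foldl_filter_eq (PySem.List.enumerate g) (sieveTest g) _
  rw [hfold, List.filter_filter]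
  have hcongr : ∀ i ∈ PySem.List.pyRange 0 ((g.length : Int) - 1) 1,
      (((PySem.List.enumerate g).all (fun p => sieveTest g p i)) && (i != blocked)) =
        ((i != blocked) && whileA g i (i + 1)) := by
    intro i hmem
    rw [sieve_eq_while g i ((PySem.List.mem_pyRange_one.mp hmem).1), Bool.and_comm]
  rw [List.filter_congr hcongr]
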